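-- pv_equiv track=rewrite | github.com/FacundoOZ/University-of-Buenos-Aires | MSc-in-Computer-Science/Algoritmos 1/guías/8_Integradora_Python.py | torneo_de_gallinas
-- ===== SOURCE A (Python) =====
-- def torneo_de_gallinas(estrategias: dict[str,str]) -> dict[str,int]:
--   res: dict[str,int]  = {}
--   suma_puntos: int    = 0                                            # Suma de puntos actuales para el jugador i-ésimo
--   for i in estrategias.keys():
--     for j in estrategias.keys():                                     # Dado un jugador i-ésimo, calculo el resultado de i contra los demás
--       if i == j:                                                     # Un jugador no juega contra si mismo
--         suma_puntos += 0
--       else:                                                          # Todas las combinaciones posibles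
--         if   estrategias[i] == 'chocador'  and estrategias[j] == 'chocador':
--           suma_puntos -= 5
--         elif estrategias[i] == 'desviador' and estrategias[j] == 'desviador':
--           suma_puntos -= 10
--         elif estrategias[i] == 'chocador'  and estrategias[j] == 'desviador':
--           suma_puntos += 10
--         elif estrategias[i] == 'desviador' and estrategias[j] == 'chocador':
--           suma_puntos -= 15
--     res[i] = suma_puntos                                             # Agrego el resultado i-ésimo contra todos los j-ésimos como clave de res
--     suma_puntos = 0                                                  # Reseteo la suma actual
--   return res
-- ===== SOURCE B (Python) =====
-- def torneo_de_gallinas(estrategias: dict[str, str]) -> dict[str, int]: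
--   vals = list(estrategias.values())
--   c = vals.count('chocador')
--   d = vals.count('desviador')
--   return {i: (-5 * (c - 1) + 10 * d if s == 'chocador'
--               else -10 * (d - 1) - 15 * c if s == 'desviador'
--               else 0)
--           for i, s in estrategias.items()}
-- ===== Notes on version B (the rewrite author's own statement) =====
-- stated objective: faster
-- what changed: Replaces the all-pairs double loop over players by counting the two strategies once and computing each player's total with an O(1) closed-form formula from those counts.
import Mathlib
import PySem

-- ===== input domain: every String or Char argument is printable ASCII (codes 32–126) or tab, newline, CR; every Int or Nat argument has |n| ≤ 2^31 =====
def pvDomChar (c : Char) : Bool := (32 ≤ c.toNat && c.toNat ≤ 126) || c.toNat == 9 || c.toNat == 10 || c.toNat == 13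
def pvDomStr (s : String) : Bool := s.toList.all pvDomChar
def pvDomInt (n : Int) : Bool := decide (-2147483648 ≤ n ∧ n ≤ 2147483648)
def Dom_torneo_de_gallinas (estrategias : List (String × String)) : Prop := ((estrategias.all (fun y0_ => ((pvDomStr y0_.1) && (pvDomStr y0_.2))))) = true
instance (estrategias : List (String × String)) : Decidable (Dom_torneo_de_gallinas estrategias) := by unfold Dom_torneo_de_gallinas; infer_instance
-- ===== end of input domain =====

-- B replaces A's all-pairs O(n^2) double loop by strategy counts and an O(1) closed-form score per player (O(n)).

-- ===== PORT A =====
-- literal transliteration of A: nested loop over the dict's keys, accumulating suma_puntos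
def torneo_de_gallinas (estrategias : List (String × String)) : List (String × Int) :=
  let d := PySem.Dict.ofList estrategias
  let ks := d.keys
  (ks.foldl (fun res i =>
      let suma : Int := ks.foldl (fun s j =>
        if i == j then s + 0
        else
          if d.getD i "" == "chocador" && d.getD j "" == "chocador" then s - 5
          else if d.getD i "" == "desviador" && d.getD j "" == "desviador" then s - 10
          else if d.getD i "" == "chocador" && d.getD j "" == "desviador" then s + 10
          else if d.getD i "" == "desviador" && d.getD j "" == "chocador" then s - 15
          else s) 0
      res.insert i suma) (PySem.Dict.empty : PySem.Dict String Int)).items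

-- ===== PORT B =====
-- literal transliteration of B: count the two strategies once, then one map with closed-form scores
def torneo_de_gallinas_alt (estrategias : List (String × String)) : List (String × Int) :=
  let dd := PySem.Dict.ofList estrategias
  let vals := dd.values
  let c : Int := vals.count "chocador"
  let d : Int := vals.count "desviador"
  dd.items.map (fun p =>
    (p.1, if p.2 == "chocador" then -5 * (c - 1) + 10 * d
          else if p.2 == "desviador" then -10 * (d - 1) - 15 * c
          else 0))

-- ===== PRECONDITION & SPEC =====
def Spec_torneo_de_gallinas (estrategias : List (String × String)) (out : List (String × Int)) : Prop := out = torneo_de_gallinas_alt estrategias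
instance (estrategias : List (String × String)) (out : List (String × Int)) : Decidable (Spec_torneo_de_gallinas estrategias out) := by unfold Spec_torneo_de_gallinas; infer_instance

-- ===== CLAIM (what is proved, stated in full; the proofs are below) =====
def Claim_equal_torneo_de_gallinas : Prop := ∀ (estrategias : List (String × String)), Dom_torneo_de_gallinas estrategias → Spec_torneo_de_gallinas estrategias (torneo_de_gallinas estrategias)

-- ===== LEMMAS AND PROOFS =====

-- the score of one match, as A's if-chain computes it
def pvSc (si sj : String) : Int :=
  if si == "chocador" && sj == "chocador" then -5
  else if si == "desviador" && sj == "desviador" then -10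
  else if si == "chocador" && sj == "desviador" then 10
  else if si == "desviador" && sj == "chocador" then -15
  else 0

-- A's inner loop step adds (if i == j then 0 else pvSc si sj)
theorem pvStep_eq (d : PySem.Dict String String) (i j : String) (s : Int) :
    (if i == j then s + 0
     else
       if d.getD i "" == "chocador" && d.getD j "" == "chocador" then s - 5
       else if d.getD i "" == "desviador" && d.getD j "" == "desviador" then s - 10
       else if d.getD i "" == "chocador" && d.getD j "" == "desviador" then s + 10
       else if d.getD i "" == "desviador" && d.getD j "" == "chocador" then s - 15
       else s)
    = s + (if i == j then 0 else pvSc (d.getD i "") (d.getD j "")) := by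
  unfold pvSc; split_ifs <;> omega

theorem pvInnerFold (d : PySem.Dict String String) (i : String) :
    ∀ (l : List String) (acc : Int),
    l.foldl (fun s j =>
        if i == j then s + 0
        else
          if d.getD i "" == "chocador" && d.getD j "" == "chocador" then s - 5
          else if d.getD i "" == "desviador" && d.getD j "" == "desviador" then s - 10
          else if d.getD i "" == "chocador" && d.getD j "" == "desviador" then s + 10
          else if d.getD i "" == "desviador" && d.getD j "" == "chocador" then s - 15
          else s) acc
    = acc + ((l.map (fun j => if i == j then 0 else pvSc (d.getD i "") (d.getD j ""))).sum) := by
  intro l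
  induction l with
  | nil => intro acc; simp
  | cons j t ih =>
    intro acc
    rw [List.foldl_cons, pvStep_eq, ih]
    simp only [List.map_cons, List.sum_cons]
    ring

-- removing the i == j skip from the sum over a nodup list containing i
theorem pvSum_skip (f : String → Int) (i : String) :
    ∀ (l : List String), l.Nodup → i ∈ l →
    ((l.map (fun j => if i == j then 0 else f j)).sum) = (l.map f).sum - f i := by
  intro l
  induction l with
  | nil => intro _ h; simp at h
  | cons a t ih =>
    intro hnd hmem
    simp only [List.nodup_cons] at hnd
    by_cases hia : i = a
    · subst hia
      have ht : (t.map (fun j => if i == j then 0 else f j)) = t.map f := by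
        apply List.map_congr_left
        intro j hj
        have hne : ¬ (i == j) = true := by
          simp only [beq_iff_eq]
          rintro rfl; exact hnd.1 hj
        rw [if_neg hne]
      simp only [List.map_cons, List.sum_cons, ht, beq_self_eq_true, if_true]
      ring
    · have hmem' : i ∈ t := by
        rcases List.mem_cons.mp hmem with h | h
        · exact absurd h hia
        · exact h
      have hne : ¬ (i == a) = true := by simp [hia]
      simp only [List.map_cons, List.sum_cons]
      rw [if_neg hne, ih hnd.2 hmem']
      ring

-- the full sum of pvSc si over a value list, in terms of counts
theorem pvSum_sc (si : String) :
    ∀ (vs : List String),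
    ((vs.map (fun v => pvSc si v)).sum)
      = pvSc si "chocador" * (vs.count "chocador" : Int)
        + pvSc si "desviador" * (vs.count "desviador" : Int) := by
  intro vs
  induction vs with
  | nil => simp
  | cons v t ih =>
    simp only [List.map_cons, List.sum_cons, List.count_cons, ih]
    by_cases hc : v = "chocador"
    · subst hc; simp; ring
    · by_cases hd : v = "desviador"
      · subst hd; simp; ring
      · have h0 : pvSc si v = 0 := by
          unfold pvSc
          have hc' : ¬ (v == "chocador") = true := by simp [hc]
          have hd' : ¬ (v == "desviador") = true := by simp [hd]
          simp [hc', hd']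
        simp [h0, hc, hd]

-- pvSc si si in closed form
theorem pvSc_self (si : String) :
    pvSc si si = (if si == "chocador" then (-5 : Int) else if si == "desviador" then -10 else 0) := by
  unfold pvSc
  by_cases h : si = "chocador"
  · simp [h]
  · by_cases h2 : si = "desviador" <;> simp [h, h2]

-- per-player equality: the inner loop total equals B's closed form
theorem pvPlayer (d : PySem.Dict String String) (i : String)
    (hnd : d.keys.Nodup) (hmem : i ∈ d.keys) :
    (d.keys.foldl (fun s j =>
        if i == j then s + 0
        else
          if d.getD i "" == "chocador" && d.getD j "" == "chocador" then s - 5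
          else if d.getD i "" == "desviador" && d.getD j "" == "desviador" then s - 10
          else if d.getD i "" == "chocador" && d.getD j "" == "desviador" then s + 10
          else if d.getD i "" == "desviador" && d.getD j "" == "chocador" then s - 15
          else s) 0)
    = (if d.getD i "" == "chocador" then
         -5 * ((d.values.count "chocador" : Int) - 1) + 10 * (d.values.count "desviador" : Int)
       else if d.getD i "" == "desviador" then
         -10 * ((d.values.count "desviador" : Int) - 1) - 15 * (d.values.count "chocador" : Int)
       else 0) := by
  rw [pvInnerFold, pvSum_skip (fun j => pvSc (d.getD i "") (d.getD j "")) i d.keys hnd hmem]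
  have hvals : d.values = d.keys.map (fun k => d.getD k "") := PySem.Dict.values_eq_map_keys d hnd ""
  have : (d.keys.map (fun j => pvSc (d.getD i "") (d.getD j ""))).sum
      = (d.values.map (fun v => pvSc (d.getD i "") v)).sum := by
    rw [hvals, List.map_map]; rfl
  rw [zero_add, this, pvSum_sc, pvSc_self]
  set si := d.getD i "" with hsi
  by_cases h : si = "chocador"
  · simp only [h]; unfold pvSc; simp; ring
  · by_cases h2 : si = "desviador"
    · have h' : ¬ (si == "chocador") = true := by simp [h]
      simp only [h2]; unfold pvSc; simp; ring
    · have h' : ¬ (si == "chocador") = true := by simp [h]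
      have h2' : ¬ (si == "desviador") = true := by simp [h2]
      unfold pvSc; simp [h', h2']

-- ===== VERDICT (by name: the statement is the Claim_ definition above) =====
theorem torneo_de_gallinas_spec : Claim_equal_torneo_de_gallinas := by
  intro estrategias _
  unfold Spec_torneo_de_gallinas torneo_de_gallinas torneo_de_gallinas_alt
  dsimp only
  set d := PySem.Dict.ofList estrategias with hd
  have hnd : d.keys.Nodup := PySem.Dict.nodup_keys_ofList estrategias
  -- A's outer loop appends one fresh pair per key
  rw [PySem.Dict.items_foldl_insert_fresh (k := fun i => i)
        (v := fun i =>
          d.keys.foldl (fun s j =>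
            if i == j then s + 0
            else
              if d.getD i "" == "chocador" && d.getD j "" == "chocador" then s - 5
              else if d.getD i "" == "desviador" && d.getD j "" == "desviador" then s - 10
              else if d.getD i "" == "chocador" && d.getD j "" == "desviador" then s + 10
              else if d.getD i "" == "desviador" && d.getD j "" == "chocador" then s - 15
              else s) 0)
        (l := d.keys) (d := PySem.Dict.empty)
        (by intro a _; exact PySem.Dict.contains_empty a)
        (by simpa using hnd)]
  -- B's map over items, rewritten over keys
  rw [PySem.Dict.items_eq_map_keys d hnd ""]
  simp only [PySem.Dict.empty, List.nil_append, List.map_map]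
  apply List.map_congr_left
  intro i hi
  simp only [Function.comp]
  rw [pvPlayer d i hnd hi]
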